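-- pv_equiv track=rewrite | github.com/shivupa/pyci | asci.py | gen_dets
-- ===== SOURCE A (Python) =====
-- import itertools
--
-- def gen_dets(norb,na,nb):
--     """generate all determinants with a given number of spatial orbitals
--     and alpha,beta electrons.
--     return a list of 2-tuples of strings"""
--     adets=[]
--     #loop over all subsets of size na from the list of orbitals
--     for alist in itertools.combinations(range(norb),na):
--         #start will all orbs unoccupied
--         idet=["0" for i in range(norb)]
--         for orb in alist:
--             #for each occupied orbital (index), replace the "0" with a "1"
--             idet[orb]="1"
--         #turn the list into a string
--         adets.append(''.join(idet))
--     if na==nb: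
--         #if nb==na, make a copy of the alpha strings (beta will be the same)
--         bdets=adets[:]
--     else:
--         bdets=[]
--         for blist in itertools.combinations(range(norb),nb):
--             idet=["0" for i in range(norb)]
--             for orb in blist:
--                 idet[orb]="1"
--             bdets.append(''.join(idet))
--     #return all pairs of (alpha,beta) strings
--     return [(i,j) for i in adets for j in bdets]
-- ===== SOURCE B (Python) =====
-- def gen_dets(norb, na, nb):
--     """generate all determinants with a given number of spatial orbitals
--     and alpha,beta electrons.
--     return a list of 2-tuples of strings"""
--     def bitstrings(n, k):
--         # all length-n bitstrings with exactly k ones, in lexicographic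
--         # order of occupied-index tuples ('1' chosen before '0' per position)
--         if k == 0:
--             return ['0' * n]
--         if k > n:
--             return []
--         return ['1' + s for s in bitstrings(n - 1, k - 1)] + \
--                ['0' + s for s in bitstrings(n - 1, k)]
--     adets = bitstrings(norb, na)
--     bdets = adets if na == nb else bitstrings(norb, nb)
--     return [(a, b) for a in adets for b in bdets]
-- ===== Notes on version B (the rewrite author's own statement) =====
-- stated objective: alternative
-- what changed: Replaces itertools.combinations plus per-combination buffer-filling and join with a direct recursive position-by-position enumeration of the bitstrings themselves ('1' before '0' at each position), reusing the alpha list when na==nb.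
import Mathlib
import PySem

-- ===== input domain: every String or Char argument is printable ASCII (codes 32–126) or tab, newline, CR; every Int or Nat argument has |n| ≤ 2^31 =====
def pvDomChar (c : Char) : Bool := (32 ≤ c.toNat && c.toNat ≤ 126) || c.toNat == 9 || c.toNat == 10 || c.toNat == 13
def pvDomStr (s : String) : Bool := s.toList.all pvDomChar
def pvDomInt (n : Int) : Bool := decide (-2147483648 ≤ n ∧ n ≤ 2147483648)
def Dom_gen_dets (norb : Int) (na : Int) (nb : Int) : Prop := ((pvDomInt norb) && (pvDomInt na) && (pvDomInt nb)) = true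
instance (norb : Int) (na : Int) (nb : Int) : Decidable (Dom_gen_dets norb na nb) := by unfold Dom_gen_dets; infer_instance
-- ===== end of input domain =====

-- B replaces itertools.combinations + index-setting by a recursive position-by-position
-- bitstring enumeration (alternative decomposition; same output, same order).

-- ===== PORT A =====
-- port of itertools.combinations(xs, r) (lexicographic order of index tuples)
def pvCombos {α : Type} (xs : List α) (r : Nat) : List (List α) :=
  match r, xs with
  | 0, _ => [[]]
  | _ + 1, [] => []
  | r + 1, x :: rest => ((pvCombos rest r).map (fun c => x :: c)) ++ pvCombos rest (r + 1)

-- build one determinant string: idet = ["0"]*norb; idet[orb] = "1" for orb in alist; ''.join(idet)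
def pvBuildDet (norb : Int) (alist : List Int) : String :=
  String.mk (alist.foldl (fun idet orb => idet.set orb.toNat '1') (List.replicate norb.toNat '0'))

def gen_dets (norb : Int) (na : Int) (nb : Int) : List (String × String) :=
  let adets := (pvCombos (PySem.List.pyRange 0 norb 1) na.toNat).map (pvBuildDet norb)
  let bdets := if na == nb then adets
               else (pvCombos (PySem.List.pyRange 0 norb 1) nb.toNat).map (pvBuildDet norb)
  adets.flatMap (fun i => bdets.map (fun j => (i, j)))

-- ===== PORT B =====
-- bitstrings(n, k) of Source B; the extra 'n ≤ 0' disjunct only totalises the region k < 0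
-- (outside Pre_) where the Python recursion does not terminate.
def pvBits (n : Int) (k : Int) : List (List Char) :=
  if k = 0 then [List.replicate n.toNat '0']
  else if k > n ∨ n ≤ 0 then []
  else ((pvBits (n - 1) (k - 1)).map (fun s => '1' :: s)) ++
       ((pvBits (n - 1) k).map (fun s => '0' :: s))
termination_by n.toNat
decreasing_by all_goals omega

def gen_dets_alt (norb : Int) (na : Int) (nb : Int) : List (String × String) :=
  let adets := (pvBits norb na).map String.mk
  let bdets := if na == nb then adets else (pvBits norb nb).map String.mk
  adets.flatMap (fun a => bdets.map (fun b => (a, b)))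

-- ===== PRECONDITION & SPEC =====
-- Pre_ excludes negative electron counts, on which A raises ValueError (combinations
-- requires r ≥ 0) and B's recursion does not terminate.
def Pre_gen_dets (norb : Int) (na : Int) (nb : Int) : Prop := 0 ≤ na ∧ 0 ≤ nb
instance (norb : Int) (na : Int) (nb : Int) : Decidable (Pre_gen_dets norb na nb) := by
  unfold Pre_gen_dets; infer_instance

def pvWitness_gen_dets : Int × Int × Int := (4, 2, 1)

def Spec_gen_dets (norb : Int) (na : Int) (nb : Int) (out : List (String × String)) : Prop := out = gen_dets_alt norb na nb
instance (norb : Int) (na : Int) (nb : Int) (out : List (String × String)) : Decidable (Spec_gen_dets norb na nb out) := by unfold Spec_gen_dets; infer_instance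

-- ===== CLAIM (what is proved, stated in full; the proofs are below) =====
def Claim_equal_gen_dets : Prop := ∀ (norb : Int) (na : Int) (nb : Int), Dom_gen_dets norb na nb → Pre_gen_dets norb na nb → Spec_gen_dets norb na nb (gen_dets norb na nb)

-- ===== LEMMAS AND PROOFS =====

-- combinations of a mapped list are mapped combinations
theorem pvCombos_map {α β : Type} (xs : List α) (f : α → β) :
    ∀ r : Nat, pvCombos (xs.map f) r = (pvCombos xs r).map (List.map f) := by
  induction xs with
  | nil => intro r; cases r <;> simp [pvCombos]
  | cons x rest ih =>
    intro r
    cases r with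
    | zero => simp [pvCombos]
    | succ r => simp [pvCombos, ih, List.map_map]

-- elements of a combination come from the source list
theorem pvCombos_mem {α : Type} (xs : List α) :
    ∀ (r : Nat) (c : List α), c ∈ pvCombos xs r → ∀ x ∈ c, x ∈ xs := by
  induction xs with
  | nil =>
    intro r c hc x hx
    cases r with
    | zero => simp [pvCombos] at hc; subst hc; simp at hx
    | succ r => simp [pvCombos] at hc
  | cons y rest ih =>
    intro r c hc x hx
    cases r with
    | zero => simp [pvCombos] at hc; subst hc; simp at hx
    | succ r =>
      simp [pvCombos] at hc
      rcases hc with ⟨c', hc', rfl⟩ | hc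
      · rcases List.mem_cons.mp hx with rfl | hx
        · exact List.mem_cons_self
        · exact List.mem_cons_of_mem _ (ih r c' hc' x hx)
      · exact List.mem_cons_of_mem _ (ih (r + 1) c hc x hx)

-- combinations longer than the list are empty
theorem pvCombos_nil_of_gt {α : Type} (xs : List α) :
    ∀ r : Nat, xs.length < r → pvCombos xs r = [] := by
  induction xs with
  | nil =>
    intro r hr
    cases r with
    | zero => omega
    | succ r => rfl
  | cons x rest ih =>
    intro r hr
    cases r with
    | zero => omega
    | succ r =>
      simp at hr
      simp [pvCombos, ih r hr, ih (r + 1) (by omega)]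

-- shifting all set-indices up by one past a fixed head cell
theorem pvFold_shift (l : List Int) (hl : ∀ x ∈ l, 0 ≤ x) (c : Char) (t : List Char) :
    (l.map (fun x => x + 1)).foldl (fun idet orb => idet.set orb.toNat '1') (c :: t) =
      c :: l.foldl (fun idet orb => idet.set orb.toNat '1') t := by
  induction l generalizing t with
  | nil => simp
  | cons x l ih =>
    have hx : 0 ≤ x := hl x (List.mem_cons_self)
    have hcast : (x + 1).toNat = x.toNat + 1 := by omega
    simp only [List.map_cons, List.foldl_cons, hcast, List.set]
    exact ih (fun y hy => hl y (List.mem_cons_of_mem _ hy)) _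

-- the main correspondence, over Nat sizes
theorem pvMain (n : Nat) : ∀ k : Nat,
    (pvCombos ((List.range n).map Int.ofNat) k).map
        (fun alist => alist.foldl (fun idet orb => idet.set orb.toNat '1') (List.replicate n '0')) =
      pvBits (n : Int) (k : Int) := by
  induction n with
  | zero =>
    intro k
    cases k with
    | zero => simp [pvCombos, pvBits]
    | succ k =>
      rw [pvBits]
      simp [pvCombos]
      omega
  | succ n ih =>
    intro k
    have hrange : (List.range (n + 1)).map Int.ofNat =
        (0 : Int) :: (((List.range n).map Int.ofNat).map (fun x => x + 1)) := by
      rw [List.range_succ_eq_map]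
      simp [List.map_map, Function.comp]
    cases k with
    | zero =>
      rw [pvBits]
      simp [pvCombos]
    | succ k =>
      rw [hrange]
      set L := (List.range n).map Int.ofNat with hL
      push_cast
      by_cases hk : n < k
      · -- too many ones requested: both sides empty
        have h1 : pvCombos (L.map (fun x => x + 1)) k = [] :=
          pvCombos_nil_of_gt _ k (by simp [hL]; omega)
        have h2 : pvCombos (L.map (fun x => x + 1)) (k + 1) = [] :=
          pvCombos_nil_of_gt _ (k + 1) (by simp [hL]; omega)
        conv_rhs => rw [pvBits]
        rw [if_neg (show ¬((k : Int) + 1 = 0) by omega),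
          if_pos (Or.inl (show (k : Int) + 1 > (n : Int) + 1 by omega))]
        simp only [pvCombos, h1, h2, List.map_nil, List.append_nil]
      · -- recursive case
        have hmemnn : ∀ c ∈ pvCombos L k, ∀ x ∈ c, 0 ≤ x := by
          intro c hc x hx
          have := pvCombos_mem L k c hc x hx
          rw [hL] at this; simp at this
          obtain ⟨m, _, rfl⟩ := this; exact Int.natCast_nonneg m
        have hmemnn' : ∀ c ∈ pvCombos L (k + 1), ∀ x ∈ c, 0 ≤ x := by
          intro c hc x hx
          have := pvCombos_mem L (k + 1) c hc x hx
          rw [hL] at this; simp at this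
          obtain ⟨m, _, rfl⟩ := this; exact Int.natCast_nonneg m
        have ih1 := ih k
        have ih2 := ih (k + 1)
        push_cast at ih1 ih2
        conv_rhs => rw [pvBits]
        rw [if_neg (show ¬((k : Int) + 1 = 0) by omega),
          if_neg (show ¬((k : Int) + 1 > (n : Int) + 1 ∨ (n : Int) + 1 ≤ 0) by
            rw [not_or]; constructor <;> omega),
          show ((n : Int) + 1 - 1) = (n : Int) by ring,
          show ((k : Int) + 1 - 1) = (k : Int) by ring,
          ← ih1, ← ih2]
        simp only [pvCombos]
        rw [pvCombos_map L (fun x => x + 1) k, pvCombos_map L (fun x => x + 1) (k + 1)]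
        rw [List.map_append, List.map_map, List.map_map, List.map_map, List.map_map]
        congr 1
        · apply List.map_congr_left
          intro c hc
          simp only [Function.comp]
          have hhead : (List.replicate (n + 1) '0').set (0 : Int).toNat '1' =
              '1' :: List.replicate n '0' := by simp [List.replicate_succ]
          simp only [List.foldl_cons, hhead]
          exact pvFold_shift c (hmemnn c hc) '1' _
        · rw [List.map_map]
          apply List.map_congr_left
          intro c hc
          simp only [Function.comp]
          rw [show List.replicate (n + 1) '0' = '0' :: List.replicate n '0' from
            List.replicate_succ ..]
          exact pvFold_shift c (hmemnn' c hc) '0' _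

-- pvBits only depends on n through n.toNat (for 0 ≤ k)
theorem pvBits_toNat (n k : Int) (hk : 0 ≤ k) : pvBits n k = pvBits (n.toNat : Int) k := by
  by_cases hn : 0 ≤ n
  · rw [Int.toNat_of_nonneg hn]
  · have h0 : n.toNat = 0 := by omega
    rw [h0]
    conv_lhs => rw [pvBits]
    conv_rhs => rw [pvBits]
    by_cases hk0 : k = 0
    · simp [hk0, h0]
    · have hn' : n ≤ 0 := by omega
      simp [hk0, hn']

-- the alpha/beta list of A equals that of B
theorem pvDets_eq (norb k : Int) (hk : 0 ≤ k) :
    (pvCombos (PySem.List.pyRange 0 norb 1) k.toNat).map (pvBuildDet norb) =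
      (pvBits norb k).map String.mk := by
  have hr : PySem.List.pyRange 0 norb 1 = (List.range norb.toNat).map Int.ofNat := by
    rw [PySem.List.pyRange_one]
    simp
  rw [hr, pvBits_toNat norb k hk]
  unfold pvBuildDet
  rw [← Int.toNat_of_nonneg hk, ← pvMain norb.toNat k.toNat, List.map_map]
  rfl

-- ===== VERDICT (by name: the statement is the Claim_ definition above) =====
theorem gen_dets_spec : Claim_equal_gen_dets := by
  intro norb na nb _ hpre
  obtain ⟨ha, hb⟩ := hpre
  show gen_dets norb na nb = gen_dets_alt norb na nb
  unfold gen_dets gen_dets_alt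
  rw [pvDets_eq norb na ha, pvDets_eq norb nb hb]
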